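-- pv_equiv track=rewrite | github.com/chlrkdgml11/baekjoon_practice | Class1/8958.py | calculate
-- ===== SOURCE A (Python) =====
-- def calculate(arr):
--     cnt = 1
--     sum = 0
--     for i in range(len(arr)):
--         if(arr[i] == 'O'):
--             sum += cnt
--             cnt += 1
--         if(arr[i] == 'X'):
--             cnt = 1
--     return sum
-- ===== SOURCE B (Python) =====
-- def calculate(arr):
--     total = 0
--     m = 0
--     for c in arr:
--         if c == 'O':
--             m += 1
--         elif c == 'X':
--             total += m * (m + 1) // 2
--             m = 0
--     return total + m * (m + 1) // 2
-- ===== Notes on version B (the rewrite author's own statement) =====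
-- stated objective: alternative
-- what changed: B keeps only the current streak length and adds each streak's triangular-number closed form m*(m+1)//2 at streak end, instead of A's incremental add-then-increment counter accumulated at every 'O'.
import Mathlib
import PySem

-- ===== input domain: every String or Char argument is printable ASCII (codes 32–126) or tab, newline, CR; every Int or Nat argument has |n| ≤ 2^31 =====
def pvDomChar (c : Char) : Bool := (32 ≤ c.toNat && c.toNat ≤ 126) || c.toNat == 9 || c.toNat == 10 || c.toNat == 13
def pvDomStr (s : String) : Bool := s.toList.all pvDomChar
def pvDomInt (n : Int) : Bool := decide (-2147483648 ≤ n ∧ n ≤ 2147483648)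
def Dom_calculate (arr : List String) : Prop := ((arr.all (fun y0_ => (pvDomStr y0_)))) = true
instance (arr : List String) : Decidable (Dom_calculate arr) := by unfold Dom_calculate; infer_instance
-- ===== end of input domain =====

-- B replaces A's add-then-increment accumulator by a streak counter flushed with the
-- triangular closed form m*(m+1)//2 at each 'X' and at the end (alternative decomposition).

-- ===== PORT A =====
-- loop body: state (cnt, sum); two independent ifs as in A
def calcStepA (s : Int × Int) (c : String) : Int × Int :=
  let s := if c == "O" then (s.1 + 1, s.2 + s.1) else s
  if c == "X" then (1, s.2) else s

def calculate (arr : List String) : Int :=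
  (arr.foldl calcStepA (1, 0)).2

-- ===== PORT B =====
-- state (total, m); '//' is PySem.Int.floordiv (exact Python floor division)
-- loop body: state (total, m); '//' is PySem.Int.floordiv (exact Python floor division)
def calcStepB (s : Int × Int) (c : String) : Int × Int :=
  if c == "O" then (s.1, s.2 + 1)
  else if c == "X" then (s.1 + PySem.Int.floordiv (s.2 * (s.2 + 1)) 2, 0)
  else s

def calculate_alt (arr : List String) : Int :=
  let s := arr.foldl calcStepB (0, 0)
  s.1 + PySem.Int.floordiv (s.2 * (s.2 + 1)) 2

-- ===== PRECONDITION & SPEC =====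
def Spec_calculate (arr : List String) (out : Int) : Prop := out = calculate_alt arr
instance (arr : List String) (out : Int) : Decidable (Spec_calculate arr out) := by unfold Spec_calculate; infer_instance

-- ===== CLAIM (what is proved, stated in full; the proofs are below) =====
def Claim_equal_calculate : Prop := ∀ (arr : List String), Dom_calculate arr → Spec_calculate arr (calculate arr)

-- ===== LEMMAS AND PROOFS =====

def pvTri (m : Int) : Int := PySem.Int.floordiv (m * (m + 1)) 2

theorem pvTri_zero : pvTri 0 = 0 := by decide

theorem pvTri_succ (m : Int) : pvTri (m + 1) = pvTri m + (m + 1) := by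
  unfold pvTri
  rw [PySem.Int.floordiv_eq_ediv_of_pos (by omega), PySem.Int.floordiv_eq_ediv_of_pos (by omega)]
  have h : (m + 1) * (m + 1 + 1) = m * (m + 1) + (m + 1) * 2 := by ring
  rw [h, Int.add_mul_ediv_right _ _ (by omega : (2:Int) ≠ 0)]

-- loop invariant: A's state is (m+1, total + pvTri m) when B's state is (total, m)
theorem pv_inv (arr : List String) : ∀ (total m : Int),
    (arr.foldl calcStepA (m + 1, total + pvTri m)).2
    = (let s := arr.foldl calcStepB (total, m); s.1 + pvTri s.2) := by
  induction arr with
  | nil => intro total m; simp [List.foldl]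
  | cons c rest ih =>
    intro total m
    rw [List.foldl_cons, List.foldl_cons]
    by_cases hO : c == "O"
    · have hX : (c == "X") = false := by
        cases h : c == "X"
        · rfl
        · exact absurd (by rw [(beq_iff_eq).mp hO] at h; exact (beq_iff_eq).mp h) (by decide)
      have eA : calcStepA (m + 1, total + pvTri m) c = (m + 1 + 1, total + pvTri (m + 1)) := by
        simp [calcStepA, hO, hX, pvTri_succ]; ring
      have eB : calcStepB (total, m) c = (total, m + 1) := by simp [calcStepB, hO]
      rw [eA, eB]
      exact ih total (m + 1)
    · by_cases hX : c == "X"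
      · have eA : calcStepA (m + 1, total + pvTri m) c = (0 + 1, (total + pvTri m) + pvTri 0) := by
          simp [calcStepA, hO, hX, pvTri_zero]
        have eB : calcStepB (total, m) c = (total + pvTri m, 0) := by simp [calcStepB, hO, hX, pvTri]
        rw [eA, eB]
        exact ih (total + pvTri m) 0
      · have eA : calcStepA (m + 1, total + pvTri m) c = (m + 1, total + pvTri m) := by
          simp [calcStepA, hO, hX]
        have eB : calcStepB (total, m) c = (total, m) := by simp [calcStepB, hO, hX]
        rw [eA, eB]
        exact ih total m

-- ===== VERDICT (by name: the statement is the Claim_ definition above) =====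
theorem calculate_spec : Claim_equal_calculate := by
  intro arr _
  unfold Spec_calculate calculate calculate_alt
  have := pv_inv arr 0 0
  rw [pvTri_zero, add_zero] at this
  simpa [pvTri] using this
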